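-- pv_equiv track=rewrite | github.com/accenture-naama-rivlin/LCDString | lcd.py | generate
-- ===== SOURCE A (Python) =====
-- def generate(number=None):
--     number_to_representation = {
--         None: ["...", "...", "..."],
--         0: ["._.", "|.|", "|_|"],
--         1: ["...", "..|", "..|"],
--         2: ["._.", "._|", "|_."],
--         3: ["._.", "._|", "._|"],
--         4: ["...", "|_|", "..|"],
--         5: ["._.", "|_.", "._|"],
--         6: ["._.", "|_.", "|_|"],
--         7: ["._.", "..|", "..|"],
--         8: ["._.", "|_|", "|_|"],
--         9: ["._.", "|_|", "..|"]
--     }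
--
--     number_to_string = str(number)
--
--     display =[]
--     for index in range(0, 3):
--         for digit in number_to_string:
--             display.append(number_to_representation[int(digit)][index] + " ")
--         display.append("\n")
--
--     display_return = ",".join(display)
--     display_return = display_return.replace(",", "")
--
--     return display_return
-- ===== SOURCE B (Python) =====
-- def generate(number=None):
--     number_to_representation = {
--         None: ["...", "...", "..."],
--         0: ["._.", "|.|", "|_|"],
--         1: ["...", "..|", "..|"],
--         2: ["._.", "._|", "|_."],
--         3: ["._.", "._|", "._|"],
--         4: ["...", "|_|", "..|"],
--         5: ["._.", "|_.", "._|"],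
--         6: ["._.", "|_.", "|_|"],
--         7: ["._.", "..|", "..|"],
--         8: ["._.", "|_|", "|_|"],
--         9: ["._.", "|_|", "..|"]
--     }
--
--     top = ""
--     mid = ""
--     bot = ""
--     for digit in str(number):
--         t, m, b = number_to_representation[int(digit)]
--         top += t + " "
--         mid += m + " "
--         bot += b + " "
--     return top + "\n" + mid + "\n" + bot + "\n"
-- ===== Notes on version B (the rewrite author's own statement) =====
-- stated objective: simpler
-- what changed: B makes one pass over the digit string maintaining three row-accumulator strings and concatenates them, instead of A's three index passes that build a flat list of cells and then comma-join and comma-strip it.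
import Mathlib
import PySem

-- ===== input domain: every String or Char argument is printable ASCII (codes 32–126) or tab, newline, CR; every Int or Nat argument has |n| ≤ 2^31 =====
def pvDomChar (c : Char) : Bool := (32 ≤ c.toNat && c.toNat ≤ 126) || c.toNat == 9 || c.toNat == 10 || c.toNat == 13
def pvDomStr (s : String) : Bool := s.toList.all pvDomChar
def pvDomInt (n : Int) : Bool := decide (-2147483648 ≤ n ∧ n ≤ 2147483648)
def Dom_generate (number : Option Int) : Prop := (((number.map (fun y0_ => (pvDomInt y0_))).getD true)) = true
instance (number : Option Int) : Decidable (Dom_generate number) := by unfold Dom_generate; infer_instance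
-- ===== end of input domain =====

-- B: one pass over str(number) with three row-accumulator strings, instead of A's three
-- index passes building a cell list that is comma-joined and then comma-stripped (same output).

-- ===== PORT A =====
-- the dict literal (keys None and 0..9, values the three glyph rows as char lists)
def pvGlyphs : PySem.Dict (Option Int) (List (List Char)) := PySem.Dict.ofList
  [ (none,   ["...".toList, "...".toList, "...".toList]),
    (some 0, ["._.".toList, "|.|".toList, "|_|".toList]),
    (some 1, ["...".toList, "..|".toList, "..|".toList]),
    (some 2, ["._.".toList, "._|".toList, "|_.".toList]),
    (some 3, ["._.".toList, "._|".toList, "._|".toList]),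
    (some 4, ["...".toList, "|_|".toList, "..|".toList]),
    (some 5, ["._.".toList, "|_.".toList, "._|".toList]),
    (some 6, ["._.".toList, "|_.".toList, "|_|".toList]),
    (some 7, ["._.".toList, "..|".toList, "..|".toList]),
    (some 8, ["._.".toList, "|_|".toList, "|_|".toList]),
    (some 9, ["._.".toList, "|_|".toList, "..|".toList]) ]

-- str(number): "None" for None, str(n) otherwise
def pvStrOf (number : Option Int) : List Char :=
  match number with
  | none => "None".toList
  | some n => PySem.Int.toChars n

-- number_to_representation[int(digit)][index] + " "  (where Python raises — int(digit) fails,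
-- KeyError, IndexError — the Options are none and the getD gives junk; those inputs are outside Pre_)
def pvCellA (c : Char) (index : Int) : List Char :=
  ((((PySem.Int.ofChars? [c]).bind fun d => pvGlyphs.get? (some d)).bind
      fun g => PySem.List.pyGet? g index).getD []) ++ [' ']

def generate (number : Option Int) : String :=
  let numberToString := pvStrOf number
  let display : List (List Char) :=
    (PySem.List.pyRange 0 3).foldl
      (fun acc index =>
        (numberToString.foldl (fun a c => a ++ [pvCellA c index]) acc) ++ ["\n".toList]) []
  String.ofList (PySem.Chars.replace (PySem.Chars.join ",".toList display) ",".toList [])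

-- ===== PORT B =====
-- t, m, b = number_to_representation[int(digit)]  (a raise → junk ([],[],[]), outside Pre_)
def pvUnpackB (c : Char) : List Char × List Char × List Char :=
  match ((PySem.Int.ofChars? [c]).bind fun d => pvGlyphs.get? (some d)) with
  | some [t, m, b] => (t, m, b)
  | _ => ([], [], [])

def generate_alt (number : Option Int) : String :=
  let rows := (pvStrOf number).foldl
    (fun (rows : List Char × List Char × List Char) c =>
      (rows.1 ++ (pvUnpackB c).1 ++ [' '],
       rows.2.1 ++ (pvUnpackB c).2.1 ++ [' '],
       rows.2.2 ++ (pvUnpackB c).2.2 ++ [' ']))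
    ([], [], [])
  String.ofList (rows.1 ++ ['\n'] ++ rows.2.1 ++ ['\n'] ++ rows.2.2 ++ ['\n'])

-- ===== PRECONDITION & SPEC =====
-- Pre_ excludes exactly the inputs where Python A raises ValueError: number=None (str(None)="None")
-- and negative numbers (str(number) contains '-'), since int(digit) fails on a non-digit character.
def Pre_generate (number : Option Int) : Prop := number.isSome = true ∧ 0 ≤ number.getD 0

instance (number : Option Int) : Decidable (Pre_generate number) := by unfold Pre_generate; infer_instance

def pvWitness_generate : Option Int := (some 910)

def Spec_generate (number : Option Int) (out : String) : Prop := out = generate_alt number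
instance (number : Option Int) (out : String) : Decidable (Spec_generate number out) := by unfold Spec_generate; infer_instance

-- ===== CLAIM (what is proved, stated in full; the proofs are below) =====
def Claim_equal_generate : Prop := ∀ (number : Option Int), Dom_generate number → Pre_generate number → Spec_generate number (generate number)

-- ===== LEMMAS AND PROOFS =====

-- replace.go with pattern "," and replacement "" just filters the commas out
theorem pvReplace_go_filter : ∀ (fuel : Nat) (l acc : List Char), l.length ≤ fuel →
    PySem.Chars.replace.go [','] [] fuel l acc = acc.reverse ++ l.filter (· ≠ ',') := by
  intro fuel
  induction fuel with
  | zero =>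
    intro l acc h
    have : l = [] := List.eq_nil_of_length_eq_zero (Nat.le_zero.mp h)
    subst this; simp [PySem.Chars.replace.go]
  | succ n ih =>
    intro l acc h
    cases l with
    | nil => simp [PySem.Chars.replace.go]
    | cons c t =>
      simp only [PySem.Chars.replace.go]
      by_cases hc : c = ','
      · subst hc
        simp only [List.isPrefixOf, Bool.and_true, beq_self_eq_true, if_pos, List.length_cons,
          List.length_nil, Nat.zero_add, List.drop_succ_cons, List.drop_zero, List.reverse_nil,
          List.nil_append]
        rw [ih t acc (by simpa using h)]
        simp
      · have hp : [','].isPrefixOf (c :: t) = false := by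
          simp [List.isPrefixOf]
          intro h'; exact hc h'.symm
        rw [hp]
        simp only [if_false, Bool.false_eq_true]
        rw [ih t (c :: acc) (by simpa using h)]
        simp [hc]

-- s.replace(",", "") removes exactly the commas
theorem pvReplace_filter (s : List Char) :
    PySem.Chars.replace s [','] [] = s.filter (· ≠ ',') := by
  simp only [PySem.Chars.replace]
  rw [if_neg (by simp)]
  simpa using pvReplace_go_filter s.length s [] (Nat.le_refl _)

-- every value stored in the dict is a comma-free triple of rows
theorem pvGlyph_shape (d : Int) (g : List (List Char))
    (h : pvGlyphs.get? (some d) = some g) :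
    ∃ t m b, g = [t, m, b] ∧ ¬ ',' ∈ t ∧ ¬ ',' ∈ m ∧ ¬ ',' ∈ b := by
  have hm := PySem.Dict.mem_items_of_get?_eq_some _ h
  have hg : g ∈ pvGlyphs.items.map Prod.snd := List.mem_map_of_mem hm
  rw [show pvGlyphs.items.map Prod.snd =
      [ ["...".toList, "...".toList, "...".toList],
        ["._.".toList, "|.|".toList, "|_|".toList],
        ["...".toList, "..|".toList, "..|".toList],
        ["._.".toList, "._|".toList, "|_.".toList],
        ["._.".toList, "._|".toList, "._|".toList],
        ["...".toList, "|_|".toList, "..|".toList],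
        ["._.".toList, "|_.".toList, "._|".toList],
        ["._.".toList, "|_.".toList, "|_|".toList],
        ["._.".toList, "..|".toList, "..|".toList],
        ["._.".toList, "|_|".toList, "|_|".toList],
        ["._.".toList, "|_|".toList, "..|".toList] ] from by decide] at hg
  fin_cases hg <;> exact ⟨_, _, _, rfl, by decide, by decide, by decide⟩

-- A's cell at row index 0/1/2 is B's unpacked row plus the trailing space
theorem pvCellA_eq (c : Char) :
    pvCellA c 0 = (pvUnpackB c).1 ++ [' '] ∧
    pvCellA c 1 = (pvUnpackB c).2.1 ++ [' '] ∧
    pvCellA c 2 = (pvUnpackB c).2.2 ++ [' '] := by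
  unfold pvCellA pvUnpackB
  cases ho : PySem.Int.ofChars? [c] with
  | none => simp
  | some d =>
    cases hg : pvGlyphs.get? (some d) with
    | none => simp [hg]
    | some g =>
      obtain ⟨t, m, b, rfl, -, -, -⟩ := pvGlyph_shape d g hg
      simp [hg, PySem.List.pyGet?, PySem.List.pyIdx?]

-- no cell contains a comma
theorem pvCellA_comma (c : Char) (i : Int) : ¬ ',' ∈ pvCellA c i := by
  unfold pvCellA
  cases ho : PySem.Int.ofChars? [c] with
  | none => simp
  | some d =>
    cases hg : pvGlyphs.get? (some d) with
    | none => simp [hg]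
    | some g =>
      obtain ⟨t, m, b, rfl, ht, hm, hb⟩ := pvGlyph_shape d g hg
      cases hv : PySem.List.pyGet? [t, m, b] i with
      | none => simp [hg, hv]
      | some v =>
        have hmem : v = t ∨ v = m ∨ v = b := by
          have : v ∈ [t, m, b] := by
            simp only [PySem.List.pyGet?] at hv
            rcases Option.bind_eq_some_iff.mp hv with ⟨k, -, hk⟩
            exact List.mem_of_getElem? hk
          simpa using this
        simp only [hg, Option.bind_some, hv, Option.getD_some, List.mem_append,
          List.mem_singleton]
        rintro (hin | h')
        · rcases hmem with rfl | rfl | rfl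
          · exact ht hin
          · exact hm hin
          · exact hb hin
        · exact absurd h' (by decide)

-- joining comma-free pieces with "," and filtering the commas back out flattens the pieces
theorem pvJoinFilter (D : List (List Char)) (h : ∀ x ∈ D, ¬ ',' ∈ x) :
    (PySem.Chars.join [','] D).filter (· ≠ ',') = D.flatten := by
  induction D with
  | nil => simp [PySem.Chars.join_nil]
  | cons x xs ih =>
    have hx : x.filter (· ≠ ',') = x :=
      List.filter_eq_self.mpr (fun a ha => by
        simp only [ne_eq, decide_eq_true_eq]
        rintro rfl
        exact h x List.mem_cons_self ha)
    cases xs with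
    | nil => rw [PySem.Chars.join_singleton, hx]; simp
    | cons y r =>
      rw [PySem.Chars.join_cons_cons]
      simp only [List.filter_append, hx]
      rw [ih (fun z hz => h z (List.mem_cons_of_mem _ hz))]
      simp

-- B's one-pass fold: each accumulator collects its row's cells in order
theorem pvFoldB (s : List Char) (r0 r1 r2 : List Char) :
    s.foldl (fun (rows : List Char × List Char × List Char) c =>
        (rows.1 ++ (pvUnpackB c).1 ++ [' '],
         rows.2.1 ++ (pvUnpackB c).2.1 ++ [' '],
         rows.2.2 ++ (pvUnpackB c).2.2 ++ [' ']))
      (r0, r1, r2)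
    = (r0 ++ (s.map (fun c => (pvUnpackB c).1 ++ [' '])).flatten,
       r1 ++ (s.map (fun c => (pvUnpackB c).2.1 ++ [' '])).flatten,
       r2 ++ (s.map (fun c => (pvUnpackB c).2.2 ++ [' '])).flatten) := by
  induction s generalizing r0 r1 r2 with
  | nil => simp
  | cons c t ih =>
    simp only [List.foldl_cons, List.map_cons, List.flatten_cons]
    rw [ih]
    simp [List.append_assoc]

-- the two ports agree on EVERY input (the totalised junk values also coincide)
theorem pvGenerate_eq (number : Option Int) : generate number = generate_alt number := by
  unfold generate generate_alt
  rw [show PySem.List.pyRange 0 3 = [0, 1, 2] from rfl]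
  simp only [show ",".toList = [','] from rfl, show "\n".toList = ['\n'] from rfl]
  simp only [List.foldl_cons, List.foldl_nil, PySem.List.foldl_append_singleton_eq_map,
    List.nil_append]
  rw [pvFoldB, pvReplace_filter]
  rw [pvJoinFilter _ (by
    intro x hx
    simp only [List.mem_append, List.mem_singleton, List.mem_map] at hx
    have : (∃ c, x = pvCellA c 0) ∨ (∃ c, x = pvCellA c 1) ∨ (∃ c, x = pvCellA c 2) ∨
        x = ['\n'] := by tauto
    rcases this with ⟨c, rfl⟩ | ⟨c, rfl⟩ | ⟨c, rfl⟩ | rfl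
    · exact pvCellA_comma c 0
    · exact pvCellA_comma c 1
    · exact pvCellA_comma c 2
    · decide)]
  rw [List.map_congr_left (fun c (_ : c ∈ pvStrOf number) => (pvCellA_eq c).1),
      List.map_congr_left (fun c (_ : c ∈ pvStrOf number) => (pvCellA_eq c).2.1),
      List.map_congr_left (fun c (_ : c ∈ pvStrOf number) => (pvCellA_eq c).2.2)]
  simp

-- ===== VERDICT (by name: the statement is the Claim_ definition above) =====
theorem generate_spec : Claim_equal_generate := by
  intro number _ _
  exact pvGenerate_eq number
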